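-- pv_equiv track=rewrite | github.com/ModeSevenIndustrialSolutions/lftools-ng | src/lftools_ng/core/jenkins.py | _detect_auth_error
-- ===== SOURCE A (Python) =====
-- def _detect_auth_error(error_message: str) -> bool:
--     """Detect if an error message indicates an authentication failure."""
--     auth_indicators = [
--         "401",
--         "unauthorized",
--         "authentication failed",
--         "invalid credentials",
--         "access denied",
--         "forbidden",
--         "login required"
--     ]
--     error_lower = error_message.lower()
--     return any(indicator in error_lower for indicator in auth_indicators)
-- ===== SOURCE B (Python) =====
-- _AUTH_INDICATORS = (
--     "401",
--     "unauthorized",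
--     "authentication failed",
--     "invalid credentials",
--     "access denied",
--     "forbidden",
--     "login required",
-- )
--
--
-- def _detect_auth_error(error_message: str) -> bool:
--     """Detect if an error message indicates an authentication failure.
--
--     Single left-to-right position scan of the message: at each position try
--     each indicator case-insensitively, instead of lowercasing the whole
--     message and running one full substring search per indicator.
--     """
--     return any(
--         error_message[i:i + len(ind)].lower() == ind
--         for i in range(len(error_message))
--         for ind in _AUTH_INDICATORS
--     )
-- ===== Notes on version B (the rewrite author's own statement) =====
-- stated objective: alternative
-- what changed: Replaces the lowercase-whole-message-then-per-indicator substring search with a single left-to-right position scan that tries each indicator case-insensitively at each position, lowercasing only the candidate window.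
import Mathlib
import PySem

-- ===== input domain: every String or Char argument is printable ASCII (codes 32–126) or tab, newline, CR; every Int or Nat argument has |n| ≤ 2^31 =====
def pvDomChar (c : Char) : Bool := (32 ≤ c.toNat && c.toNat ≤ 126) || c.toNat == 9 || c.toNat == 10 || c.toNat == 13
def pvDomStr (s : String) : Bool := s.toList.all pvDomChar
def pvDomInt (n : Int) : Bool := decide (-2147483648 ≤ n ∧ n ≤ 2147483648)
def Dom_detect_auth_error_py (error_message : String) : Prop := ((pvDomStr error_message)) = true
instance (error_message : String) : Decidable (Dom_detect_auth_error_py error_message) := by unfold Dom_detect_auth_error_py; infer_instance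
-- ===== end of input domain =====

-- B replaces A's lowercase-everything-then-substring-search-per-indicator with one
-- left-to-right position scan trying each indicator case-insensitively (alternative decomposition).

-- ===== PORT A =====
def detect_auth_error_py (error_message : String) : Bool :=
  let auth_indicators : List String :=
    ["401", "unauthorized", "authentication failed", "invalid credentials",
     "access denied", "forbidden", "login required"]
  let error_lower := PySem.Str.lower error_message
  auth_indicators.any (fun indicator => PySem.Str.isIn indicator error_lower)

-- ===== PORT B =====
def pvAuthIndicators : List String :=
  ["401", "unauthorized", "authentication failed", "invalid credentials",
   "access denied", "forbidden", "login required"]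

def detect_auth_error_py_alt (error_message : String) : Bool :=
  (List.range error_message.toList.length).any (fun i =>
    pvAuthIndicators.any (fun ind =>
      PySem.Str.lower (PySem.Str.slice error_message (some (i : Int))
        (some ((i : Int) + PySem.Str.len ind))) == ind))

-- ===== PRECONDITION & SPEC =====
def Spec_detect_auth_error_py (error_message : String) (out : Bool) : Prop := out = detect_auth_error_py_alt error_message
instance (error_message : String) (out : Bool) : Decidable (Spec_detect_auth_error_py error_message out) := by unfold Spec_detect_auth_error_py; infer_instance

-- ===== CLAIM (what is proved, stated in full; the proofs are below) =====
def Claim_equal_detect_auth_error_py : Prop := ∀ (error_message : String), Dom_detect_auth_error_py error_message → Spec_detect_auth_error_py error_message (detect_auth_error_py error_message)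

-- ===== LEMMAS AND PROOFS =====

-- swap the order of two nested `any`s
theorem pv_any_swap {α β : Type} (l₁ : List α) (l₂ : List β) (p : α → β → Bool) :
    l₁.any (fun a => l₂.any (fun b => p a b)) = l₂.any (fun b => l₁.any (fun a => p a b)) := by
  rw [Bool.eq_iff_iff]
  simp only [List.any_eq_true]
  tauto

-- membership-aware congruence for `any`
theorem pv_any_congr_mem {α : Type} (l : List α) (p q : α → Bool)
    (h : ∀ a ∈ l, p a = q a) : l.any p = l.any q := by
  rw [Bool.eq_iff_iff]
  simp only [List.any_eq_true]
  constructor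
  · rintro ⟨a, ha, hp⟩; exact ⟨a, ha, (h a ha) ▸ hp⟩
  · rintro ⟨a, ha, hp⟩; exact ⟨a, ha, (h a ha).symm ▸ hp⟩

-- the inner match of B, moved to the list side
theorem pv_matchB (s ind : String) (i : Nat) :
    (PySem.Str.lower (PySem.Str.slice s (some (i : Int))
        (some ((i : Int) + PySem.Str.len ind))) == ind)
      = decide (PySem.Chars.lower ((s.toList.drop i).take ind.toList.length) = ind.toList) := by
  rw [Bool.eq_iff_iff]
  simp only [beq_iff_eq, decide_eq_true_eq, ← String.toList_inj]
  simp [PySem.List.slice_natCast_add]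

-- scanning all start positions for one nonempty indicator = substring search in the lowered text
theorem pv_scan_eq (cs ind : List Char) (hne : ind ≠ []) :
    (List.range cs.length).any (fun i =>
        decide (PySem.Chars.lower ((cs.drop i).take ind.length) = ind))
      = PySem.Chars.isIn ind (PySem.Chars.lower cs) := by
  rw [Bool.eq_iff_iff, ← PySem.Chars.exists_prefix_drop_iff_isIn]
  simp only [List.any_eq_true, List.mem_range, decide_eq_true_eq, PySem.Chars.lower,
    List.map_take, List.map_drop]
  constructor
  · rintro ⟨i, _, h⟩
    exact ⟨i, h ▸ List.take_prefix _ _⟩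
  · rintro ⟨j, hpre⟩
    have hlen : ind.length ≤ ((cs.map PySem.Chars.lowerChar).drop j).length := hpre.length_le
    have hnz : 0 < ind.length := List.length_pos_iff.mpr hne
    simp only [List.length_drop, List.length_map] at hlen
    refine ⟨j, by omega, ?_⟩
    exact (List.prefix_iff_eq_take.mp hpre).symm

-- ===== VERDICT (by name: the statement is the Claim_ definition above) =====
theorem detect_auth_error_py_spec : Claim_equal_detect_auth_error_py := by
  intro s _
  show detect_auth_error_py s = detect_auth_error_py_alt s
  unfold detect_auth_error_py detect_auth_error_py_alt pvAuthIndicators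
  rw [pv_any_swap]
  refine (pv_any_congr_mem _ _ _ (fun ind hind => ?_)).symm
  have hne : ind.toList ≠ [] := by
    simp only [List.mem_cons, List.not_mem_nil, or_false] at hind
    rcases hind with h|h|h|h|h|h|h <;> subst h <;> decide
  simp only [pv_matchB]
  rw [pv_scan_eq s.toList ind.toList hne]
  simp
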